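-- pv_equiv track=rewrite | github.com/yeseong31/coding-test | 프로그래머스/1/92334. 신고 결과 받기/신고 결과 받기.py | solution
-- ===== SOURCE A (Python) =====
-- from collections import defaultdict
--
-- def solution(id_list, report, k):
--     sanctions = defaultdict(set)
--     mail = defaultdict(int)
--
--     for ids in report:
--         report_id, reported_id = ids.split()
--         sanctions[reported_id].add(report_id)
--
--     for key in sanctions:
--         if len(sanctions[key]) < k:
--             continue
--         for v in sanctions[key]:
--             mail[v] += 1
--
--     return [mail[id] for id in id_list]
-- ===== SOURCE B (Python) =====
-- def solution(id_list, report, k):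
--     pairs = set()
--     for r in report:
--         a, b = r.split()
--         pairs.add((a, b))
--     return [sum(1 for (a, b) in pairs
--                 if a == user and sum(1 for (_, d) in pairs if d == b) >= k)
--             for user in id_list]
-- ===== Notes on version B (the rewrite author's own statement) =====
-- stated objective: alternative
-- what changed: Drops all dicts/Counters: B builds only a deduplicated set of (reporter, reported) pairs and answers each user by a direct nested count over that set (pairs by the user whose reported target is itself reported by >= k distinct pairs), instead of A's dict-of-sets grouping plus nested per-group mail accumulation.
import Mathlib
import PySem

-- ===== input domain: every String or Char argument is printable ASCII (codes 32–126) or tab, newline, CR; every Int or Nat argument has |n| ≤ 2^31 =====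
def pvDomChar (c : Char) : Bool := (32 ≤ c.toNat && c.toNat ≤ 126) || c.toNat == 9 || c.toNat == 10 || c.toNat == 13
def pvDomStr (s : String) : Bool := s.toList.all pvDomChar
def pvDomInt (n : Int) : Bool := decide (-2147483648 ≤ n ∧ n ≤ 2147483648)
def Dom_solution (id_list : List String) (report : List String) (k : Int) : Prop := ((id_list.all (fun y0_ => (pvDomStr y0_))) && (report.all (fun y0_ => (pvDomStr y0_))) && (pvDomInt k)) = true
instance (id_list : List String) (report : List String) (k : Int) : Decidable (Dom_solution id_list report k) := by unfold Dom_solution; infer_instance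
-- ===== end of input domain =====

-- B drops A's dict-of-sets grouping and mail dict entirely: it builds one deduplicated set of
-- (reporter, reported) pairs and answers each user by direct nested counting over that set
-- (alternative decomposition, no hash maps; quadratic in the distinct pairs, not faster).


-- ===== PORT A =====
-- shared helper: the unpack 'a, b = s.split()' (exact when split() yields exactly two words;
-- Pre_solution guarantees that — Python raises ValueError otherwise)
def split2 (s : String) : String × String :=
  match PySem.Str.split₀ s with
  | [a, b] => (a, b)
  | _ => ("", "")

def solution (id_list : List String) (report : List String) (k : Int) : List Int :=
  let sanctions : PySem.Dict String (PySem.Set String) :=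
    report.foldl (fun d ids =>
      (fun rp => d.insert rp.2 ((d.getD rp.2 PySem.Set.empty).add rp.1)) (split2 ids))
      PySem.Dict.empty
  let mail : PySem.Dict String Int :=
    sanctions.keys.foldl (fun m key =>
      if PySem.Set.len (sanctions.getD key PySem.Set.empty) < k then m
      else (sanctions.getD key PySem.Set.empty).foldl (fun m v => m.modify v 0 (· + 1)) m)
      PySem.Dict.empty
  id_list.map (fun id => mail.getD id 0)

-- ===== PORT B =====
def solution_alt (id_list : List String) (report : List String) (k : Int) : List Int :=
  let pairs : PySem.Set (String × String) :=
    report.foldl (fun s r => s.add (split2 r)) PySem.Set.empty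
  id_list.map (fun user =>
    (((pairs : List (String × String)).countP (fun p =>
        p.1 == user &&
        decide (k ≤ (((pairs : List (String × String)).countP
                        (fun q => q.2 == p.2) : Nat) : Int)))) : Nat))

-- ===== PRECONDITION & SPEC =====
-- Pre_ excludes exactly the reports that do not split into two words: there Python A's
-- tuple unpack raises ValueError (and B raises too).
def Pre_solution (id_list : List String) (report : List String) (k : Int) : Prop :=
  ∀ r ∈ report, (PySem.Str.split₀ r).length = 2
instance (id_list : List String) (report : List String) (k : Int) : Decidable (Pre_solution id_list report k) := by unfold Pre_solution; infer_instance
def pvWitness_solution : List String × List String × Int :=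
  (["muzi", "frodo", "apeach"], ["muzi frodo", "apeach frodo", "muzi frodo"], 2)

def Spec_solution (id_list : List String) (report : List String) (k : Int) (out : List Int) : Prop := out = solution_alt id_list report k
instance (id_list : List String) (report : List String) (k : Int) (out : List Int) : Decidable (Spec_solution id_list report k out) := by unfold Spec_solution; infer_instance

-- ===== CLAIM (what is proved, stated in full; the proofs are below) =====
def Claim_equal_solution : Prop := ∀ (id_list : List String) (report : List String) (k : Int), Dom_solution id_list report k → Pre_solution id_list report k → Spec_solution id_list report k (solution id_list report k)

-- ===== LEMMAS AND PROOFS =====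

-- sanctions[t] after A's grouping loop: the set of reporters of t, in first-report order
theorem sanc_getD (L : List (String × String)) (d : PySem.Dict String (PySem.Set String)) (t : String) :
    (L.foldl (fun d p => d.insert p.2 ((d.getD p.2 PySem.Set.empty).add p.1)) d).getD t PySem.Set.empty
      = PySem.Set.update (d.getD t PySem.Set.empty) ((L.filter (fun p => p.2 == t)).map (fun p => p.1)) := by
  induction L generalizing d with
  | nil => rfl
  | cons p L ih =>
    simp only [List.foldl_cons, List.filter_cons, ih]
    by_cases h : p.2 = t
    · rw [← h]
      simp only [BEq.rfl, if_pos, List.map_cons, PySem.Set.update_cons,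
        PySem.Dict.getD_insert_self]
    · have hb : (p.2 == t) = false := by simp [h]
      simp [hb, PySem.Dict.getD_insert_of_ne _ _ _ (Ne.symm h)]

-- A's mail loop: mail[x] counts qualifying keys whose reporter set contains x
theorem mailA_getD (k : Int) (g : String → PySem.Set String) (hg : ∀ t, (g t : List String).Nodup)
    (K : List String) (m : PySem.Dict String Int) (x : String) :
    (K.foldl (fun m t =>
        if PySem.Set.len (g t) < k then m
        else (g t).foldl (fun m v => m.modify v 0 (· + 1)) m) m).getD x 0
      = m.getD x 0 + (K.countP (fun t => decide (k ≤ PySem.Set.len (g t)) && PySem.Set.contains (g t) x) : Int) := by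
  induction K generalizing m with
  | nil => simp
  | cons t K ih =>
    simp only [List.foldl_cons, List.countP_cons]
    by_cases h : PySem.Set.len (g t) < k
    · rw [if_pos h, ih]
      have hk : decide (k ≤ PySem.Set.len (g t)) = false := decide_eq_false (not_le.mpr h)
      rw [hk]
      simp only [Bool.false_and, Bool.false_eq_true, if_false]
      push_cast; ring
    · rw [if_neg h, ih, PySem.Dict.getD_foldl_modify_add_one]
      have hk : decide (k ≤ PySem.Set.len (g t)) = true := decide_eq_true (not_lt.mp h)
      rw [hk]
      by_cases hx : x ∈ (g t : List String)
      · have hc : PySem.Set.contains (g t) x = true := (PySem.Set.contains_iff _ _).2 hx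
        rw [hc, List.count_eq_one_of_mem (hg t) hx]
        simp only [Bool.true_and, if_true]
        push_cast; ring
      · have hc : PySem.Set.contains (g t) x = false :=
          Bool.eq_false_iff.2 (fun hcc => hx ((PySem.Set.contains_iff _ _).1 hcc))
        rw [hc, List.count_eq_zero_of_not_mem hx]
        simp only [Bool.true_and, Bool.false_eq_true, if_false]
        push_cast; ring

-- set(...) commutes with filter
theorem foldl_add_filter {α : Type} [BEq α] [LawfulBEq α] (q : α → Bool) (xs : List α) (s : PySem.Set α) :
    List.filter q (xs.foldl PySem.Set.add s) = (xs.filter q).foldl PySem.Set.add (List.filter q s) := by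
  induction xs generalizing s with
  | nil => rfl
  | cons x xs ih =>
    simp only [List.foldl_cons, List.filter_cons]
    by_cases hq : q x = true
    · rw [hq, if_pos rfl, ih, List.foldl_cons]
      congr 1
      rw [PySem.Set.add_eq_ite, PySem.Set.add_eq_ite]
      by_cases hm : x ∈ s
      · rw [if_pos hm, if_pos (List.mem_filter.2 ⟨hm, hq⟩)]
      · rw [if_neg hm, if_neg (fun hc => hm (List.mem_filter.1 hc).1), List.filter_append]
        simp [hq]
    · have hq' : q x = false := Bool.eq_false_iff.2 hq
      rw [hq']
      simp only [Bool.false_eq_true, if_false]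
      rw [ih]
      congr 1
      rw [PySem.Set.add_eq_ite]
      by_cases hm : x ∈ s
      · rw [if_pos hm]
      · rw [if_neg hm, List.filter_append]
        simp [hq']

theorem ofList_filter {α : Type} [BEq α] [LawfulBEq α] (q : α → Bool) (xs : List α) :
    PySem.Set.ofList (xs.filter q) = List.filter q (PySem.Set.ofList xs) := by
  rw [PySem.Set.ofList_eq_foldl, PySem.Set.ofList_eq_foldl, foldl_add_filter]
  rfl

-- on pairs whose second component is the constant t, set(...) commutes with taking the first component
theorem foldl_add_map_fst (t : String) (M : List (String × String)) (hM : ∀ p ∈ M, p.2 = t)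
    (s : PySem.Set (String × String)) (hs : ∀ p ∈ s, p.2 = t) :
    List.map Prod.fst (M.foldl PySem.Set.add s) = (M.map Prod.fst).foldl PySem.Set.add (List.map Prod.fst s) := by
  induction M generalizing s with
  | nil => rfl
  | cons p M ih =>
    simp only [List.foldl_cons, List.map_cons]
    have hstep : List.map Prod.fst (s.add p) = PySem.Set.add (List.map Prod.fst s) p.1 := by
      rw [PySem.Set.add_eq_ite, PySem.Set.add_eq_ite]
      by_cases hm : p ∈ s
      · rw [if_pos hm, if_pos (List.mem_map.2 ⟨p, hm, rfl⟩)]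
      · have hm' : p.1 ∉ List.map Prod.fst s := by
          intro hc
          rcases List.mem_map.1 hc with ⟨q, hq, hq1⟩
          exact hm (by
            have : q = p := Prod.ext hq1 ((hs q hq).trans (hM p (List.mem_cons_self)).symm)
            rwa [this] at hq)
        rw [if_neg hm, if_neg hm', List.map_append]
        rfl
    rw [← hstep]
    exact ih (fun q hq => hM q (List.mem_cons_of_mem _ hq))
      (s.add p)
      (fun q hq => by
        rcases (PySem.Set.mem_add _ _ _).1 hq with h | h
        · exact hs q h
        · rw [h]; exact hM p List.mem_cons_self)

theorem length_ofList_map_fst (t : String) (M : List (String × String)) (hM : ∀ p ∈ M, p.2 = t) :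
    (PySem.Set.ofList (M.map Prod.fst)).length = (PySem.Set.ofList M).length := by
  have h := foldl_add_map_fst t M hM [] (by intro p hp; cases hp)
  simp only [List.map_nil] at h
  rw [PySem.Set.ofList_eq_foldl, PySem.Set.ofList_eq_foldl, ← h, List.length_map]

-- the counting bijection: qualifying pairs with reporter x ↔ qualifying reported users t with (x,t) a report
theorem countP_pairs (P : List (String × String)) (hnd : P.Nodup) (x : String) (r : String → Bool) :
    P.countP (fun p => p.1 == x && r p.2)
      = (PySem.Set.ofList (P.map Prod.snd)).countP (fun t => decide ((x, t) ∈ P) && r t) := by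
  rw [List.countP_eq_length_filter, List.countP_eq_length_filter]
  have hFnd : ((P.filter (fun p => p.1 == x && r p.2)).map Prod.snd).Nodup := by
    refine List.Nodup.map_on ?_ (hnd.filter _)
    intro p hp q hq hpq
    have hp' := List.mem_filter.1 hp
    have hq' := List.mem_filter.1 hq
    have hp1 : p.1 = x := by
      have := hp'.2; simp only [Bool.and_eq_true, beq_iff_eq] at this; exact this.1
    have hq1 : q.1 = x := by
      have := hq'.2; simp only [Bool.and_eq_true, beq_iff_eq] at this; exact this.1
    exact Prod.ext (hp1.trans hq1.symm) hpq
  have hGnd : ((PySem.Set.ofList (P.map Prod.snd)).filter (fun t => decide ((x, t) ∈ P) && r t)).Nodup :=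
    (PySem.Set.nodup_ofList _).filter _
  have hperm : ((P.filter (fun p => p.1 == x && r p.2)).map Prod.snd).Perm
      ((PySem.Set.ofList (P.map Prod.snd)).filter (fun t => decide ((x, t) ∈ P) && r t)) := by
    rw [List.perm_ext_iff_of_nodup hFnd hGnd]
    intro t
    constructor
    · intro ht
      rcases List.mem_map.1 ht with ⟨p, hp, hp2⟩
      have hp' := List.mem_filter.1 hp
      have hc := hp'.2
      simp only [Bool.and_eq_true, beq_iff_eq] at hc
      have hpeq : p = (x, t) := Prod.ext hc.1 hp2
      refine List.mem_filter.2 ⟨(PySem.Set.mem_ofList _ _).2 (List.mem_map.2 ⟨p, hp'.1, hp2⟩), ?_⟩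
      simp only [Bool.and_eq_true, decide_eq_true_eq]
      exact ⟨hpeq ▸ hp'.1, hp2 ▸ hc.2⟩
    · intro ht
      have ht' := List.mem_filter.1 ht
      have hc := ht'.2
      simp only [Bool.and_eq_true, decide_eq_true_eq] at hc
      refine List.mem_map.2 ⟨(x, t), List.mem_filter.2 ⟨hc.1, ?_⟩, rfl⟩
      simp [hc.2]
  calc (P.filter (fun p => p.1 == x && r p.2)).length
      = ((P.filter (fun p => p.1 == x && r p.2)).map Prod.snd).length := by rw [List.length_map]
    _ = _ := hperm.length_eq

-- ===== VERDICT (by name: the statement is the Claim_ definition above) =====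
theorem solution_spec : Claim_equal_solution := by
  intro id_list report k _ _
  unfold Spec_solution solution solution_alt
  refine List.map_congr_left ?_
  intro x _
  set L := report.map split2 with hL
  -- both folds over report are folds over L
  have hA : (report.foldl (fun d ids =>
        (fun rp => d.insert rp.2 ((d.getD rp.2 PySem.Set.empty).add rp.1)) (split2 ids))
        PySem.Dict.empty)
      = L.foldl (fun d p => d.insert p.2 ((d.getD p.2 PySem.Set.empty).add p.1))
        PySem.Dict.empty :=
    (List.foldl_map (f := split2)
      (g := fun (d : PySem.Dict String (PySem.Set String)) (rp : String × String) => d.insert rp.2 ((d.getD rp.2 PySem.Set.empty).add rp.1))).symm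
  have hB : (report.foldl (fun s r => s.add (split2 r)) PySem.Set.empty)
      = PySem.Set.ofList L := by
    rw [PySem.Set.ofList_eq_foldl, ← List.foldl_map (f := split2) (g := PySem.Set.add)]
    rfl
  rw [hA, hB]
  set S := L.foldl (fun d p => d.insert p.2 ((d.getD p.2 PySem.Set.empty).add p.1))
    PySem.Dict.empty with hS
  have hgchar : ∀ t, S.getD t PySem.Set.empty
      = PySem.Set.ofList ((L.filter (fun p => p.2 == t)).map (fun p => p.1)) := by
    intro t; rw [hS, sanc_getD]; rfl
  have hgnd : ∀ t, (S.getD t PySem.Set.empty : List String).Nodup := by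
    intro t; rw [hgchar t]; exact PySem.Set.nodup_ofList _
  rw [mailA_getD k (fun t => S.getD t PySem.Set.empty) hgnd S.keys PySem.Dict.empty x]
  rw [countP_pairs (PySem.Set.ofList L) (PySem.Set.nodup_ofList L) x
      (fun t => decide (k ≤ (((PySem.Set.ofList L).countP (fun q => q.2 == t) : Nat) : Int)))]
  have hkeys : S.keys = PySem.Set.ofList (L.map (fun p => p.2)) := by
    rw [hS, PySem.Dict.keys_foldl_insert_key L (fun p => p.2)
      (fun d p => (d.getD p.2 PySem.Set.empty).add p.1) PySem.Dict.empty]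
    rfl
  have hlen : ∀ t, PySem.Set.len (S.getD t PySem.Set.empty)
      = (((PySem.Set.ofList L).countP (fun q => q.2 == t) : Nat) : Int) := by
    intro t
    have hM : ∀ p ∈ L.filter (fun p => p.2 == t), p.2 = t := by
      intro p hp; simpa using (List.mem_filter.1 hp).2
    have h1 : PySem.Set.len (S.getD t PySem.Set.empty)
        = ((PySem.Set.ofList ((L.filter (fun p => p.2 == t)).map (fun p => p.1))).length : Int) := by
      rw [hgchar t]; rfl
    rw [h1]
    congr 1
    have h2 := length_ofList_map_fst t (L.filter (fun p => p.2 == t)) hM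
    have h3 : (L.filter (fun p => p.2 == t)).map (fun p => p.1)
        = (L.filter (fun p => p.2 == t)).map Prod.fst := rfl
    rw [h3, h2, ofList_filter, ← List.countP_eq_length_filter]
  have hcont : ∀ t, PySem.Set.contains (S.getD t PySem.Set.empty) x
      = decide ((x, t) ∈ PySem.Set.ofList L) := by
    intro t
    have hiff : PySem.Set.contains (S.getD t PySem.Set.empty) x = true
        ↔ (x, t) ∈ PySem.Set.ofList L := by
      rw [hgchar t, PySem.Set.contains_iff, PySem.Set.mem_ofList, PySem.Set.mem_ofList]
      constructor
      · intro h
        rcases List.mem_map.1 h with ⟨p, hp, h1⟩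
        have h2 := List.mem_filter.1 hp
        have hpe : p = (x, t) := Prod.ext h1 (by simpa using h2.2)
        exact hpe ▸ h2.1
      · intro h
        exact List.mem_map.2 ⟨(x, t), List.mem_filter.2 ⟨h, by simp⟩, rfl⟩
    rcases Bool.dichotomy (PySem.Set.contains (S.getD t PySem.Set.empty) x) with hb | hb
    · rw [hb]; exact (decide_eq_false (fun hm => by rw [hiff.2 hm] at hb; cases hb)).symm
    · rw [hb]; exact (decide_eq_true (hiff.1 hb)).symm
  have hApred : S.keys.countP (fun t =>
        decide (k ≤ PySem.Set.len (S.getD t PySem.Set.empty)) &&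
        PySem.Set.contains (S.getD t PySem.Set.empty) x)
      = S.keys.countP (fun t => decide ((x, t) ∈ PySem.Set.ofList L) &&
        decide (k ≤ (((PySem.Set.ofList L).countP (fun q => q.2 == t) : Nat) : Int))) :=
    List.countP_congr (fun t _ => by rw [hlen t, hcont t, Bool.and_comm])
  rw [hApred]
  have hkperm : (S.keys).Perm (PySem.Set.ofList ((PySem.Set.ofList L).map Prod.snd)) := by
    rw [hkeys]
    rw [List.perm_ext_iff_of_nodup (PySem.Set.nodup_ofList _) (PySem.Set.nodup_ofList _)]
    intro t
    rw [PySem.Set.mem_ofList, PySem.Set.mem_ofList]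
    constructor
    · intro h
      rcases List.mem_map.1 h with ⟨p, hp, h1⟩
      exact List.mem_map.2 ⟨p, (PySem.Set.mem_ofList _ _).2 hp, h1⟩
    · intro h
      rcases List.mem_map.1 h with ⟨p, hp, h1⟩
      exact List.mem_map.2 ⟨p, (PySem.Set.mem_ofList _ _).1 hp, h1⟩
  rw [hkperm.countP_eq]
  simp [PySem.Dict.getD, PySem.Dict.get?, PySem.Dict.empty]
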